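-- pv_equiv track=rewrite | github.com/ambiguoustexture/openclaw-wakatime | setup_wakatime.py | upsert_wakatime_config
-- ===== SOURCE A (Python) =====
-- def upsert_wakatime_config(content: str, api_key: str) -> str:
--     normalized_key = api_key.strip()
--     lines = content.splitlines()
--     if not lines:
--         return f"[settings]\napi_key = {normalized_key}\n"
--
--     in_settings = False
--     found = False
--     settings_seen = False
--     insert_at = None
--
--     for idx, line in enumerate(lines):
--         stripped = line.strip()
--         if stripped.startswith("[") and stripped.endswith("]"):
--             if in_settings and insert_at is None:
--                 insert_at = idx
--             in_settings = stripped.lower() == "[settings]"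
--             settings_seen = settings_seen or in_settings
--             continue
--         if in_settings and stripped and not stripped.startswith("#") and "=" in stripped:
--             key, _value = stripped.split("=", 1)
--             if key.strip() == "api_key":
--                 lines[idx] = f"api_key = {normalized_key}"
--                 found = True
--
--     if not found:
--         if settings_seen:
--             if insert_at is None:
--                 insert_at = len(lines)
--             lines.insert(insert_at, f"api_key = {normalized_key}")
--         else:
--             if lines and lines[-1].strip():
--                 lines.append("")
--             lines.extend(["[settings]", f"api_key = {normalized_key}"])
--
--     return "\n".join(lines).rstrip() + "\n"
-- ===== SOURCE B (Python) =====
-- # B: block decomposition — partition lines into section blocks, rewrite settings blocks,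
-- # insert structurally (no indices, no enumerate, no in-place index mutation).
--
-- def _is_header(line):
--     s = line.strip()
--     return s.startswith("[") and s.endswith("]")
--
--
-- def _is_settings(header):
--     return header is not None and header.strip().lower() == "[settings]"
--
--
-- def _is_api_key_line(line):
--     s = line.strip()
--     return bool(s) and not s.startswith("#") and "=" in s and s.split("=", 1)[0].strip() == "api_key"
--
--
-- def _split_blocks(lines):
--     blocks = []
--     header, body = None, []
--     for line in lines:
--         if _is_header(line):
--             if header is not None or body:
--                 blocks.append((header, body))
--             header, body = line, []
--         else:
--             body.append(line)
--     blocks.append((header, body))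
--     return blocks
--
--
-- def _rewrite(blocks, new_line):
--     out = []
--     found = False
--     for header, body in blocks:
--         if _is_settings(header):
--             new_body = []
--             for line in body:
--                 if _is_api_key_line(line):
--                     new_body.append(new_line)
--                     found = True
--                 else:
--                     new_body.append(line)
--             out.append((header, new_body))
--         else:
--             out.append((header, body))
--     return out, found
--
--
-- def _add_to_first_settings(blocks, new_line):
--     out = []
--     done = False
--     for header, body in blocks:
--         if not done and _is_settings(header):
--             out.append((header, body + [new_line]))
--             done = True
--         else:
--             out.append((header, body))
--     return out
--
--
-- def _flatten(blocks):
--     lines = []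
--     for header, body in blocks:
--         if header is not None:
--             lines.append(header)
--         lines.extend(body)
--     return lines
--
--
-- def upsert_wakatime_config(content: str, api_key: str) -> str:
--     key = api_key.strip()
--     lines = content.splitlines()
--     if not lines:
--         return "[settings]\napi_key = " + key + "\n"
--     key_line = "api_key = " + key
--     blocks, found = _rewrite(_split_blocks(lines), key_line)
--     if found:
--         out = _flatten(blocks)
--     elif any(_is_settings(h) for h, _ in blocks):
--         out = _flatten(_add_to_first_settings(blocks, key_line))
--     else:
--         out = _flatten(blocks)
--         if out[-1].strip():
--             out.append("")
--         out.extend(["[settings]", key_line])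
--     return "\n".join(out).rstrip() + "\n"
-- ===== Notes on version B (the rewrite author's own statement) =====
-- stated objective: alternative
-- what changed: B partitions the lines into section blocks (header + body), rewrites api_key lines inside every [settings] block, and inserts the missing key line structurally into the first settings block's body (or appends a new block), replacing A's single indexed loop that tracks in_settings/found/settings_seen/insert_at state and mutates/inserts by list index.
import Mathlib
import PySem

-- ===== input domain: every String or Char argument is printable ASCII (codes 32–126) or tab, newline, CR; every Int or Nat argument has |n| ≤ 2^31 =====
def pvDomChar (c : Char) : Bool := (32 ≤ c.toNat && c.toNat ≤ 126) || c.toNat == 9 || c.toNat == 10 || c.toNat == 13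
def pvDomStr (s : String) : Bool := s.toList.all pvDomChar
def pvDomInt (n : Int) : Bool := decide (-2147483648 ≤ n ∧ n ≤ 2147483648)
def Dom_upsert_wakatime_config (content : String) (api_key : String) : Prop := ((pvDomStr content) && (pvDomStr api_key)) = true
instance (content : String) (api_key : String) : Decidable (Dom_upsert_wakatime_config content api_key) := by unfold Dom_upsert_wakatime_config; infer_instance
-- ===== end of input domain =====

-- B re-implements the upsert by a block decomposition (partition lines into section blocks,
-- rewrite the settings blocks, insert structurally into the first settings block) instead of
-- A's single indexed loop with an insert position; same cost, different decomposition.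

-- ===== PORT A =====
-- A's for-loop over enumerate(lines): the only mutation is of the cell being visited, so the
-- loop is a map-with-state threading (in_settings, found, settings_seen, insert_at, idx).
def aLoop (key : String) : List String → Bool → Bool → Bool → Option Nat → Nat →
    List String × Bool × Bool × Option Nat
  | [], _, found, seen, ins, _ => ([], found, seen, ins)
  | l :: rest, inS, found, seen, ins, idx =>
    let stripped := PySem.Str.strip l
    if PySem.Str.startswith stripped "[" && PySem.Str.endswith stripped "]" then
      let ins' := if inS && ins == none then some idx else ins
      let inS' := PySem.Str.lower stripped == "[settings]"
      let r := aLoop key rest inS' found (seen || inS') ins' (idx + 1)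
      (l :: r.1, r.2)
    else if inS && !(stripped == "") && !PySem.Str.startswith stripped "#" &&
        PySem.Str.isIn "=" stripped then
      if PySem.Str.strip (((PySem.Str.splitMax? stripped "=" 1).getD []).headD "") == "api_key" then
        let r := aLoop key rest inS true seen ins (idx + 1)
        (("api_key = " ++ key) :: r.1, r.2)
      else
        let r := aLoop key rest inS found seen ins (idx + 1)
        (l :: r.1, r.2)
    else
      let r := aLoop key rest inS found seen ins (idx + 1)
      (l :: r.1, r.2)

def upsert_wakatime_config (content : String) (api_key : String) : String :=
  let key := PySem.Str.strip api_key
  let lines := PySem.Str.splitlines content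
  if lines == [] then "[settings]\napi_key = " ++ key ++ "\n"
  else
    let r := aLoop key lines false false false none 0
    let lines' := r.1
    let found := r.2.1
    let seen := r.2.2.1
    let ins := r.2.2.2
    let lines2 :=
      if !found then
        if seen then
          PySem.List.insert lines' ((ins.getD lines'.length : Nat) : Int) ("api_key = " ++ key)
        else
          (if !(lines' == []) && !(PySem.Str.strip (PySem.List.pyGetD lines' (-1) "") == "") then
            lines' ++ [""]
          else lines') ++ ["[settings]", "api_key = " ++ key]
      else lines'
    PySem.Str.rstrip (PySem.Str.join "\n" lines2) ++ "\n"

-- ===== PORT B =====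
def bIsHeader (l : String) : Bool :=
  let s := PySem.Str.strip l
  PySem.Str.startswith s "[" && PySem.Str.endswith s "]"

def bIsSettings : Option String → Bool
  | none => false
  | some h => PySem.Str.lower (PySem.Str.strip h) == "[settings]"

def bIsApiKeyLine (l : String) : Bool :=
  let s := PySem.Str.strip l
  !(s == "") && !PySem.Str.startswith s "#" && PySem.Str.isIn "=" s &&
    PySem.Str.strip (((PySem.Str.splitMax? s "=" 1).getD []).headD "") == "api_key"

def bSplitBlocks : List String → Option String → List String → List (Option String × List String)
  | [], h, b => [(h, b)]
  | l :: rest, h, b =>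
    if bIsHeader l then
      if h != none || b != [] then (h, b) :: bSplitBlocks rest (some l) []
      else bSplitBlocks rest (some l) []
    else bSplitBlocks rest h (b ++ [l])

def bRewriteBody (newLine : String) : List String → List String × Bool
  | [] => ([], false)
  | l :: rest =>
    let r := bRewriteBody newLine rest
    if bIsApiKeyLine l then (newLine :: r.1, true) else (l :: r.1, r.2)

def bRewrite (newLine : String) :
    List (Option String × List String) → List (Option String × List String) × Bool
  | [] => ([], false)
  | (h, b) :: rest =>
    let r := bRewrite newLine rest
    if bIsSettings h then
      let rb := bRewriteBody newLine b
      ((h, rb.1) :: r.1, rb.2 || r.2)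
    else ((h, b) :: r.1, r.2)

def bAddFirst (newLine : String) :
    List (Option String × List String) → List (Option String × List String)
  | [] => []
  | (h, b) :: rest =>
    if bIsSettings h then (h, b ++ [newLine]) :: rest
    else (h, b) :: bAddFirst newLine rest

def bFlatten : List (Option String × List String) → List String
  | [] => []
  | (h, b) :: rest => h.toList ++ b ++ bFlatten rest

def upsert_wakatime_config_alt (content : String) (api_key : String) : String :=
  let key := PySem.Str.strip api_key
  let lines := PySem.Str.splitlines content
  if lines == [] then "[settings]\napi_key = " ++ key ++ "\n"
  else
    let keyLine := "api_key = " ++ key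
    let rw := bRewrite keyLine (bSplitBlocks lines none [])
    let out :=
      if rw.2 then bFlatten rw.1
      else if rw.1.any (fun p => bIsSettings p.1) then bFlatten (bAddFirst keyLine rw.1)
      else
        let o := bFlatten rw.1
        (if !(PySem.Str.strip (PySem.List.pyGetD o (-1) "") == "") then o ++ [""] else o) ++
          ["[settings]", keyLine]
    PySem.Str.rstrip (PySem.Str.join "\n" out) ++ "\n"

-- ===== PRECONDITION & SPEC =====
def Spec_upsert_wakatime_config (content : String) (api_key : String) (out : String) : Prop := out = upsert_wakatime_config_alt content api_key
instance (content : String) (api_key : String) (out : String) : Decidable (Spec_upsert_wakatime_config content api_key out) := by unfold Spec_upsert_wakatime_config; infer_instance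

-- ===== CLAIM (what is proved, stated in full; the proofs are below) =====
def Claim_equal_upsert_wakatime_config : Prop := ∀ (content : String) (api_key : String), Dom_upsert_wakatime_config content api_key → Spec_upsert_wakatime_config content api_key (upsert_wakatime_config content api_key)

-- ===== LEMMAS AND PROOFS =====

-- Characterisation of A's loop as four independent components.
def hdrS (l : String) : Bool := PySem.Str.lower (PySem.Str.strip l) == "[settings]"

def aOut (nl : String) (inS : Bool) : List String → List String
  | [] => []
  | l :: rest =>
    if bIsHeader l then l :: aOut nl (hdrS l) rest
    else if inS && bIsApiKeyLine l then nl :: aOut nl inS rest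
    else l :: aOut nl inS rest

def aFound (inS : Bool) : List String → Bool
  | [] => false
  | l :: rest =>
    if bIsHeader l then aFound (hdrS l) rest
    else if inS && bIsApiKeyLine l then true
    else aFound inS rest

def aSeen : List String → Bool
  | [] => false
  | l :: rest => if bIsHeader l then hdrS l || aSeen rest else aSeen rest

def aIns (inS : Bool) : List String → Option Nat
  | [] => none
  | l :: rest =>
    if bIsHeader l then
      if inS then some 0 else (aIns (hdrS l) rest).map (· + 1)
    else (aIns inS rest).map (· + 1)

def insRest (nl : String) (inS : Bool) (rest : List String) : List String :=
  match aIns inS rest with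
  | some k => rest.take k ++ nl :: rest.drop k
  | none => rest ++ [nl]

theorem map_add_shift' (o : Option Nat) (idx : Nat) :
    (o.map (fun k => k + (1 + idx))) = o.map (fun k => k + (idx + 1)) := by
  cases o with
  | none => rfl
  | some k => simp; omega

theorem map_add_zero (o : Option Nat) : (o.map (fun k => k + 0)) = o := by
  cases o <;> simp

theorem aLoop_eq (key : String) (rest : List String) :
    ∀ (inS found seen : Bool) (ins : Option Nat) (idx : Nat),
    aLoop key rest inS found seen ins idx =
      (aOut ("api_key = " ++ key) inS rest, found || aFound inS rest, seen || aSeen rest,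
        ins.or ((aIns inS rest).map (· + idx))) := by
  induction rest with
  | nil => intro inS found seen ins idx; simp [aLoop, aOut, aFound, aSeen, aIns]
  | cons l rest ih =>
    intro inS found seen ins idx
    cases inS <;> cases ins <;>
      simp only [aLoop, aOut, aFound, aSeen, aIns, bIsHeader, bIsApiKeyLine, hdrS, ih] <;>
      split_ifs <;>
      simp_all [Bool.or_assoc, Option.or, Option.map_map,
        map_add_shift']

theorem bIsSettings_some (l : String) : bIsSettings (some l) = hdrS l := rfl

theorem bIsSettings_none : bIsSettings none = false := rfl

theorem aOut_id (nl : String) (rest : List String) :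
    ∀ inS, aFound inS rest = false → aOut nl inS rest = rest := by
  induction rest with
  | nil => intro inS _; rfl
  | cons l rest ih =>
    intro inS hf
    simp only [aOut, aFound] at *
    by_cases hh : bIsHeader l = true
    · simp only [hh, if_pos] at hf ⊢
      rw [ih _ hf]
    · by_cases hk : (inS && bIsApiKeyLine l) = true
      · simp [hh, hk] at hf
      · simp only [hh, hk] at hf ⊢
        simp at hf ⊢
        rw [ih _ hf]

theorem bFlatten_split (rest : List String) :
    ∀ (h : Option String) (b : List String),
    bFlatten (bSplitBlocks rest h b) = h.toList ++ b ++ rest := by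
  induction rest with
  | nil => intro h b; simp [bSplitBlocks, bFlatten]
  | cons l rest ih =>
    intro h b
    simp only [bSplitBlocks]
    by_cases hh : bIsHeader l = true
    · simp only [hh, if_pos]
      by_cases hk : (h != none || b != []) = true
      · simp [hk, bFlatten, ih]
      · have h1 : h = none := by
          cases h <;> simp_all
        have h2 : b = [] := by
          cases b <;> simp_all
        simp [ih, h1, h2]
    · simp [hh, ih]

theorem bAny_split (rest : List String) :
    ∀ (h : Option String) (b : List String),
    (bSplitBlocks rest h b).any (fun p => bIsSettings p.1) = (bIsSettings h || aSeen rest) := by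
  induction rest with
  | nil => intro h b; simp [bSplitBlocks, aSeen]
  | cons l rest ih =>
    intro h b
    simp only [bSplitBlocks, aSeen]
    by_cases hh : bIsHeader l = true
    · simp only [hh, if_pos]
      by_cases hk : (h != none || b != []) = true
      · simp [hk, ih, bIsSettings_some]
      · have h1 : h = none := by
          cases h <;> simp_all
        have h2 : b = [] := by
          cases b <;> simp_all
        subst h1; subst h2
        rw [if_neg hk, ih]
        simp [bIsSettings, hdrS]
    · simp [hh, ih]

theorem bRewriteBody_append (nl : String) (b : List String) (l : String) :
    bRewriteBody nl (b ++ [l]) =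
      ((bRewriteBody nl b).1 ++ [if bIsApiKeyLine l then nl else l],
        (bRewriteBody nl b).2 || bIsApiKeyLine l) := by
  induction b with
  | nil => by_cases hk : bIsApiKeyLine l = true <;> simp [bRewriteBody, hk]
  | cons x b ih =>
    by_cases hx : bIsApiKeyLine x = true <;>
      simp [bRewriteBody, hx, ih]

theorem bRW_split_found (nl : String) (rest : List String) :
    ∀ (h : Option String) (b : List String),
    (bRewrite nl (bSplitBlocks rest h b)).2 =
      ((if bIsSettings h then (bRewriteBody nl b).2 else false) || aFound (bIsSettings h) rest) := by
  induction rest with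
  | nil =>
    intro h b
    cases hs : bIsSettings h <;> simp [bSplitBlocks, bRewrite, aFound, hs]
  | cons l rest ih =>
    intro h b
    simp only [bSplitBlocks]
    by_cases hh : bIsHeader l = true
    · rw [if_pos hh]
      by_cases hk : (h != none || b != []) = true
      · rw [if_pos hk]
        cases hs : bIsSettings h <;>
          simp [bRewrite, hs, ih, aFound, bIsSettings_some, hh, bRewriteBody]
      · have h1 : h = none := by cases h <;> simp_all
        have h2 : b = [] := by cases b <;> simp_all
        subst h1; subst h2
        rw [if_neg hk, ih]
        simp [bRewriteBody, aFound, hh, bIsSettings, hdrS]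
    · rw [if_neg hh, ih]
      cases hs : bIsSettings h
      · simp [aFound, hh]
      · simp only [aFound, hh, if_true, bRewriteBody_append]
        simp [Bool.or_assoc]

theorem bRW_split_flatten (nl : String) (rest : List String) :
    ∀ (h : Option String) (b : List String),
    bFlatten (bRewrite nl (bSplitBlocks rest h b)).1 =
      h.toList ++ (if bIsSettings h then (bRewriteBody nl b).1 else b) ++
        aOut nl (bIsSettings h) rest := by
  induction rest with
  | nil =>
    intro h b
    cases hs : bIsSettings h <;> simp [bSplitBlocks, bRewrite, bFlatten, aOut, hs]
  | cons l rest ih =>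
    intro h b
    simp only [bSplitBlocks]
    by_cases hh : bIsHeader l = true
    · rw [if_pos hh]
      by_cases hk : (h != none || b != []) = true
      · rw [if_pos hk]
        cases hs : bIsSettings h <;>
          simp [bRewrite, hs, ih, aOut, bIsSettings_some, hh, bRewriteBody, bFlatten]
      · have h1 : h = none := by cases h <;> simp_all
        have h2 : b = [] := by cases b <;> simp_all
        subst h1; subst h2
        rw [if_neg hk, ih]
        simp [bRewriteBody, aOut, hh, bIsSettings, hdrS]
    · rw [if_neg hh, ih]
      cases hs : bIsSettings h
      · simp [aOut, hh]
      · simp only [if_true, bRewriteBody_append]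
        simp [aOut, hh]
        cases ha : bIsApiKeyLine l <;> simp

theorem bRewriteBody_id (nl : String) (b : List String) :
    (bRewriteBody nl b).2 = false → (bRewriteBody nl b).1 = b := by
  induction b with
  | nil => intro _; rfl
  | cons x b ih =>
    intro hf
    by_cases hx : bIsApiKeyLine x = true
    · simp [bRewriteBody, hx] at hf
    · simp only [bRewriteBody, hx] at hf ⊢
      simp at hf ⊢
      exact ih hf

theorem bRewrite_id (nl : String) (blocks : List (Option String × List String)) :
    (bRewrite nl blocks).2 = false → (bRewrite nl blocks).1 = blocks := by
  induction blocks with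
  | nil => intro _; rfl
  | cons p blocks ih =>
    obtain ⟨h, b⟩ := p
    intro hf
    by_cases hs : bIsSettings h = true
    · simp only [bRewrite, hs, if_pos] at hf ⊢
      simp at hf ⊢
      exact ⟨bRewriteBody_id nl b hf.1, ih hf.2⟩
    · simp only [bRewrite, hs] at hf ⊢
      simp at hf ⊢
      exact ih hf

theorem aIns_lt (rest : List String) :
    ∀ (inS : Bool) (k : Nat), aIns inS rest = some k → k < rest.length := by
  induction rest with
  | nil => intro inS k hk; simp [aIns] at hk
  | cons l rest ih =>
    intro inS k hk
    simp only [aIns] at hk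
    by_cases hh : bIsHeader l = true
    · simp only [hh, if_pos] at hk
      by_cases hs : inS = true
      · rw [hs] at hk
        simp at hk
        subst hk
        simp
      · simp only [hs] at hk
        simp at hk
        obtain ⟨m, hm, rfl⟩ := hk
        have := ih _ _ hm
        simp; omega
    · simp only [hh, if_neg, Bool.false_eq_true, not_false_iff] at hk
      simp at hk
      obtain ⟨m, hm, rfl⟩ := hk
      have := ih _ _ hm
      simp; omega

theorem bAddFirst_split (nl : String) (rest : List String) :
    ∀ (h : Option String) (b : List String), (bIsSettings h || aSeen rest) = true →
    bFlatten (bAddFirst nl (bSplitBlocks rest h b)) =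
      h.toList ++ b ++ insRest nl (bIsSettings h) rest := by
  induction rest with
  | nil =>
    intro h b hyp
    simp [aSeen] at hyp
    simp [bSplitBlocks, bAddFirst, hyp, bFlatten, insRest, aIns]
  | cons l rest ih =>
    intro h b hyp
    simp only [bSplitBlocks]
    by_cases hh : bIsHeader l = true
    · rw [if_pos hh]
      by_cases hk : (h != none || b != []) = true
      · rw [if_pos hk]
        cases hs : bIsSettings h
        · have hyp' : (bIsSettings (some l) || aSeen rest) = true := by
            rw [hs] at hyp
            simp only [aSeen, hh, if_pos] at hyp
            simp only [bIsSettings_some]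
            simpa using hyp
          simp only [bAddFirst, hs, Bool.false_eq_true, if_false, bFlatten]
          rw [ih _ _ hyp']
          simp only [bIsSettings_some, insRest, aIns, hh, if_pos, Bool.false_eq_true,
            if_false, hdrS]
          cases hai : aIns (PySem.Str.lower (PySem.Str.strip l) == "[settings]") rest <;>
            simp [List.append_assoc, List.take_succ_cons, List.drop_succ_cons]
        · simp only [bAddFirst, hs, if_true, bFlatten]
          rw [bFlatten_split]
          simp [insRest, aIns, hh]
      · have h1 : h = none := by cases h <;> simp_all
        have h2 : b = [] := by cases b <;> simp_all
        subst h1; subst h2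
        rw [if_neg hk]
        have hyp' : (bIsSettings (some l) || aSeen rest) = true := by
          simp only [bIsSettings] at hyp
          simp only [aSeen, hh, if_pos] at hyp
          simp only [bIsSettings_some]
          simpa using hyp
        rw [ih _ _ hyp']
        simp only [insRest, aIns, bIsSettings, hh, if_pos, Bool.false_eq_true,
          if_false, hdrS]
        cases hai : aIns (PySem.Str.lower (PySem.Str.strip l) == "[settings]") rest <;>
          simp [List.take_succ_cons, List.drop_succ_cons]
    · rw [if_neg hh]
      have hyp' : (bIsSettings h || aSeen rest) = true := by
        simp only [aSeen, hh, Bool.false_eq_true, if_false] at hyp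
        exact hyp
      rw [ih _ _ hyp']
      simp only [insRest, aIns, hh, Bool.false_eq_true, if_false]
      cases hai : aIns (bIsSettings h) rest <;>
        simp [List.append_assoc, List.take_succ_cons, List.drop_succ_cons]

theorem main_glue (content api_key : String) :
    upsert_wakatime_config content api_key = upsert_wakatime_config_alt content api_key := by
  unfold upsert_wakatime_config upsert_wakatime_config_alt
  simp only []
  by_cases hnil : (PySem.Str.splitlines content == []) = true
  · rw [if_pos hnil, if_pos hnil]
  · rw [if_neg hnil, if_neg hnil]
    rw [aLoop_eq]
    simp only [Option.or, map_add_zero]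
    rw [bRW_split_found, bRW_split_flatten]
    simp only [bIsSettings_none, Bool.false_eq_true, if_false, Bool.false_or]
    set nl := "api_key = " ++ PySem.Str.strip api_key with hnl
    set lines := PySem.Str.splitlines content with hlines
    by_cases hF : aFound false lines = true
    · simp [hF]
    · simp only [hF, Bool.false_eq_true, if_false, Bool.not_false, if_true]
      have hid : aOut nl false lines = lines := aOut_id nl lines false (by simpa using hF)
      have hrw : (bRewrite nl (bSplitBlocks lines none [])).1 = bSplitBlocks lines none [] := by
        apply bRewrite_id
        rw [bRW_split_found]
        simp [bIsSettings]
        simpa using hF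
      rw [hrw, bAny_split]
      simp only [bIsSettings_none, Bool.false_or]
      by_cases hS : aSeen lines = true
      · simp only [hS, if_true, hid]
        rw [bAddFirst_split nl lines none [] (by simp [bIsSettings, hS])]
        simp only [bIsSettings, Option.toList, List.nil_append]
        cases hI : aIns false lines with
        | some k =>
          have hk := aIns_lt lines false k hI
          simp only [hI, Option.getD, insRest]
          rw [PySem.List.insert_natCast lines k nl (Nat.le_of_lt hk)]
        | none =>
          simp only [hI, Option.getD, insRest]
          rw [PySem.List.insert_natCast lines lines.length nl (Nat.le_refl _)]
          simp
      · simp only [hS, Bool.false_eq_true, if_false, hid]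
        have h0 : (lines == []) = false := by simpa using hnil
        simp [h0]

-- ===== VERDICT (by name: the statement is the Claim_ definition above) =====
theorem upsert_wakatime_config_spec : Claim_equal_upsert_wakatime_config := by
  intro content api_key _
  unfold Spec_upsert_wakatime_config
  exact main_glue content api_key
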